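-- pv_equiv track=rewrite | github.com/furkankocyigitfk/CodeSignal-Solutions | Arcade/Intro/differentSquares.py | differentSquares
-- ===== SOURCE A (Python) =====
-- def differentSquares(matrix):
--     s = set()
--     for i in range(len(matrix)-1):
--         for j in range(len(matrix[i])-1):
--             temp = (matrix[i][j], matrix[i][j+1],
--                     matrix[i+1][j], matrix[i+1][j+1])
--             if temp not in s:
--                 s.add(temp)
--     return len(s)
-- ===== SOURCE B (Python) =====
-- def differentSquares(matrix):
--     squares = []
--     for i in range(len(matrix) - 1):
--         row = matrix[i]
--         nxt = matrix[i + 1]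
--         for j in range(len(row) - 1):
--             squares.append((row[j], row[j + 1], nxt[j], nxt[j + 1]))
--     squares.sort()
--     count = 0
--     prev = None
--     for t in squares:
--         if t != prev:
--             count += 1
--             prev = t
--     return count
-- ===== Notes on version B (the rewrite author's own statement) =====
-- stated objective: alternative
-- what changed: Replaces the incremental hash-set with membership test inside the nested loops by collecting every 2x2 tuple into a flat list, sorting it, and counting runs of distinct adjacent elements in one final pass.
import Mathlib
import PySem

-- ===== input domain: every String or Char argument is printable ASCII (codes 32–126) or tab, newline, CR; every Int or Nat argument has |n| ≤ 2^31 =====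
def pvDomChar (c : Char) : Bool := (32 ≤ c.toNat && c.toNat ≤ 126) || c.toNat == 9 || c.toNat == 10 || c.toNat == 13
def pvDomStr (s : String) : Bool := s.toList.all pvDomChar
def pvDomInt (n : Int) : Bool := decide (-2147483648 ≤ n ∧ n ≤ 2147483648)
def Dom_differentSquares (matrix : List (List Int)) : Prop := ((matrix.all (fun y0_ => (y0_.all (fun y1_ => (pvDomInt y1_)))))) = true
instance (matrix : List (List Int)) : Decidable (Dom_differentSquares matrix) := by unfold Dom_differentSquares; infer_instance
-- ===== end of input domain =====

-- B collects all 2x2 tuples into a flat list, sorts it, and counts runs of distinct adjacent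
-- elements, instead of A's incremental set with an in-loop membership test (alternative algorithm).


-- ===== PORT A =====
def differentSquares (matrix : List (List Int)) : Int :=
  PySem.Set.len <|
    (List.range (matrix.length - 1)).foldl (fun s i =>
      (List.range ((matrix.getD i []).length - 1)).foldl (fun s j =>
        let temp := ((matrix.getD i []).getD j 0, (matrix.getD i []).getD (j+1) 0,
                     (matrix.getD (i+1) []).getD j 0, (matrix.getD (i+1) []).getD (j+1) 0)
        if PySem.Set.contains s temp then s else PySem.Set.add s temp) s)
      ([] : PySem.Set (Int × Int × Int × Int))

-- ===== PORT B =====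
-- Python's tuple comparison in `squares.sort()` is lexicographic; Lean's Prod order is pointwise,
-- so the sort key embeds the tuple into the lexicographic product (an order isomorphism).
def sqKey (t : Int × Int × Int × Int) : Lex (Int × Lex (Int × Lex (Int × Int))) :=
  toLex (t.1, toLex (t.2.1, toLex (t.2.2.1, t.2.2.2)))

def differentSquares_alt (matrix : List (List Int)) : Int :=
  let squares := (List.range (matrix.length - 1)).foldl (fun acc i =>
    let row := matrix.getD i []
    let nxt := matrix.getD (i+1) []
    (List.range (row.length - 1)).foldl (fun acc j =>
      acc ++ [(row.getD j 0, row.getD (j+1) 0, nxt.getD j 0, nxt.getD (j+1) 0)]) acc) []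
  let sortedSq := PySem.List.sorted squares sqKey false
  let res := sortedSq.foldl
    (fun st t => if st.2 = some t then st else (st.1 + 1, some t))
    ((0 : Int), (none : Option (Int × Int × Int × Int)))
  res.1

-- ===== PRECONDITION & SPEC =====
-- Pre_ excludes exactly the ragged matrices on which the Python A raises IndexError:
-- a row with at least 2 entries followed by a strictly shorter row.
def Pre_differentSquares (matrix : List (List Int)) : Prop :=
  ∀ p ∈ matrix.zip matrix.tail, 2 ≤ p.1.length → p.1.length ≤ p.2.length
instance (matrix : List (List Int)) : Decidable (Pre_differentSquares matrix) := by
  unfold Pre_differentSquares; infer_instance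

def pvWitness_differentSquares : List (List Int) := [[1, 2, 1], [2, 2, 2], [1, 2, 1]]

def Spec_differentSquares (matrix : List (List Int)) (out : Int) : Prop := out = differentSquares_alt matrix
instance (matrix : List (List Int)) (out : Int) : Decidable (Spec_differentSquares matrix out) := by unfold Spec_differentSquares; infer_instance

-- ===== CLAIM (what is proved, stated in full; the proofs are below) =====
def Claim_equal_differentSquares : Prop := ∀ (matrix : List (List Int)), Dom_differentSquares matrix → Pre_differentSquares matrix → Spec_differentSquares matrix (differentSquares matrix)

-- ===== LEMMAS AND PROOFS =====

-- the flat list of all 2x2 squares, row-major (both ports enumerate it in this order)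
def sqList (matrix : List (List Int)) : List (Int × Int × Int × Int) :=
  (List.range (matrix.length - 1)).flatMap (fun i =>
    (List.range ((matrix.getD i []).length - 1)).map (fun j =>
      ((matrix.getD i []).getD j 0, (matrix.getD i []).getD (j+1) 0,
       (matrix.getD (i+1) []).getD j 0, (matrix.getD (i+1) []).getD (j+1) 0)))

lemma guarded_add {α : Type} [BEq α] (s : PySem.Set α) (x : α) :
    (if PySem.Set.contains s x then s else PySem.Set.add s x) = PySem.Set.add s x := by
  simp [PySem.Set.add, PySem.Set.contains]

lemma inner_add {α β : Type} [BEq β] (f : α → β) (r : List α) (s : PySem.Set β) :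
    r.foldl (fun s j => if PySem.Set.contains s (f j) then s else PySem.Set.add s (f j)) s
      = PySem.Set.update s (r.map f) := by
  have hb : (fun (s : PySem.Set β) j => if PySem.Set.contains s (f j) then s else PySem.Set.add s (f j))
      = fun s j => PySem.Set.add s (f j) := by
    funext s j; exact guarded_add s (f j)
  rw [hb]
  induction r generalizing s with
  | nil => rfl
  | cons a r ih =>
    simp only [List.foldl_cons, List.map_cons]
    rw [ih]
    rfl

lemma update_flat {α β : Type} [BEq β] (g : α → List β) (l : List α) (s : PySem.Set β) :
    l.foldl (fun s i => PySem.Set.update s (g i)) s = PySem.Set.update s (l.flatMap g) := by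
  induction l generalizing s with
  | nil => rfl
  | cons a l ih =>
    simp only [List.foldl_cons, List.flatMap_cons]
    rw [ih]
    simp [PySem.Set.update, List.foldl_append]

lemma A_eq (matrix : List (List Int)) :
    differentSquares matrix = PySem.Set.len (PySem.Set.ofList (sqList matrix)) := by
  unfold differentSquares sqList
  congr 1
  have h : (fun (s : PySem.Set (Int × Int × Int × Int)) (i : Nat) =>
      (List.range ((matrix.getD i []).length - 1)).foldl (fun s j =>
        let temp := ((matrix.getD i []).getD j 0, (matrix.getD i []).getD (j+1) 0,
                     (matrix.getD (i+1) []).getD j 0, (matrix.getD (i+1) []).getD (j+1) 0)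
        if PySem.Set.contains s temp then s else PySem.Set.add s temp) s)
      = (fun s i => PySem.Set.update s ((List.range ((matrix.getD i []).length - 1)).map
          (fun j => ((matrix.getD i []).getD j 0, (matrix.getD i []).getD (j+1) 0,
                     (matrix.getD (i+1) []).getD j 0, (matrix.getD (i+1) []).getD (j+1) 0)))) := by
    funext s i
    exact inner_add _ _ _
  rw [h, update_flat]
  rw [PySem.Set.ofList_eq_foldl]
  rfl

lemma ofList_len {α : Type} [BEq α] [LawfulBEq α] [DecidableEq α] (xs : List α) :
    PySem.Set.len (PySem.Set.ofList xs) = (xs.toFinset.card : Int) := by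
  rw [← PySem.List.dedup_eq_ofList]
  have h1 : (PySem.List.dedup xs).toFinset = xs.toFinset := by
    ext a; simp [List.mem_toFinset]
  have h2 := List.toFinset_card_of_nodup (PySem.List.nodup_dedup xs)
  show ((PySem.List.dedup xs).length : Int) = (xs.toFinset.card : Int)
  rw [← h2, h1]

lemma filter_toFinset_erase {α : Type} [DecidableEq α] (t : List α) (y : α) :
    (t.filter (fun z => z ≠ y)).toFinset = t.toFinset.erase y := by
  ext a
  simp [Finset.mem_erase, and_comm]

lemma card_cons_eq {α : Type} [DecidableEq α] (y : α) (t : List α) :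
    (((y :: t).toFinset.card : Nat) : Int)
      = 1 + ((t.filter (fun z => z ≠ y)).toFinset.card : Int) := by
  rw [filter_toFinset_erase, List.toFinset_cons]
  by_cases h : y ∈ t.toFinset
  · rw [Finset.insert_eq_self.mpr h]
    have := Finset.card_erase_add_one h
    omega
  · rw [Finset.card_insert_of_notMem h, Finset.erase_eq_of_notMem h]
    push_cast
    ring

lemma run_aux {α κ : Type} [DecidableEq α] [LinearOrder κ] (key : α → κ)
    (hinj : Function.Injective key) :
    ∀ (l : List α) (c : Int) (x : α), l.Pairwise (fun a b => key a ≤ key b) →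
      (∀ y ∈ l, key x ≤ key y) →
      (l.foldl (fun st t => if st.2 = some t then st else (st.1 + 1, some t)) (c, some x)).1
        = c + (((l.filter (fun y => y ≠ x)).toFinset.card : Nat) : Int) := by
  intro l
  induction l with
  | nil => intro c x _ _; simp
  | cons y t ih =>
    intro c x hl hx
    rw [List.pairwise_cons] at hl
    by_cases hyx : y = x
    · subst hyx
      rw [List.foldl_cons, if_pos (rfl : ((c : Int), some y).2 = some y)]
      rw [ih c y hl.2 hl.1]
      simp
    · have hxt : x ∉ t := by
        intro hxmem
        have h1 : key y ≤ key x := hl.1 x hxmem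
        have h2 : key x ≤ key y := hx y (List.mem_cons_self ..)
        exact hyx (hinj (le_antisymm h1 h2))
      have step : ¬ ((c, some x).2 = some y) := by
        simp only [Option.some.injEq]
        intro h; exact hyx h.symm
      rw [List.foldl_cons, if_neg step]
      rw [ih (c + 1) y hl.2 hl.1]
      have hfe : (y :: t).filter (fun z => z ≠ x) = y :: t := by
        rw [List.filter_cons_of_pos (by simpa using hyx), List.filter_eq_self.mpr]
        intro z hz
        simp only [decide_eq_true_eq]
        intro hzx; subst hzx; exact hxt hz
      rw [hfe, card_cons_eq]
      ring

lemma run_eq_card {α κ : Type} [DecidableEq α] [LinearOrder κ] (key : α → κ)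
    (hinj : Function.Injective key) (l : List α)
    (hl : l.Pairwise (fun a b => key a ≤ key b)) :
    (l.foldl (fun st t => if st.2 = some t then st else (st.1 + 1, some t))
        ((0 : Int), (none : Option α))).1 = ((l.toFinset.card : Nat) : Int) := by
  cases l with
  | nil => simp
  | cons y t =>
    rw [List.pairwise_cons] at hl
    have step : ¬ (((0 : Int), (none : Option α)).2 = some y) := by simp
    rw [List.foldl_cons, if_neg step,
      show (((0 : Int), (none : Option α)).1 + 1) = (1 : Int) from rfl]
    rw [run_aux key hinj t 1 y hl.2 hl.1, card_cons_eq]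

lemma sqKey_inj : Function.Injective sqKey := by
  intro a b h
  obtain ⟨a1, a2, a3, a4⟩ := a
  obtain ⟨b1, b2, b3, b4⟩ := b
  simpa [sqKey, Prod.ext_iff] using h

lemma B_eq (matrix : List (List Int)) :
    differentSquares_alt matrix = (((sqList matrix).toFinset.card : Nat) : Int) := by
  unfold differentSquares_alt
  have hsq : (List.range (matrix.length - 1)).foldl (fun acc i =>
      let row := matrix.getD i []
      let nxt := matrix.getD (i+1) []
      (List.range (row.length - 1)).foldl (fun acc j =>
        acc ++ [(row.getD j 0, row.getD (j+1) 0, nxt.getD j 0, nxt.getD (j+1) 0)]) acc) []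
      = sqList matrix := by
    have h : (fun (acc : List (Int × Int × Int × Int)) (i : Nat) =>
        (List.range ((matrix.getD i []).length - 1)).foldl (fun acc j =>
          acc ++ [((matrix.getD i []).getD j 0, (matrix.getD i []).getD (j+1) 0,
                   (matrix.getD (i+1) []).getD j 0, (matrix.getD (i+1) []).getD (j+1) 0)]) acc)
        = (fun acc i => acc ++ (List.range ((matrix.getD i []).length - 1)).map
            (fun j => ((matrix.getD i []).getD j 0, (matrix.getD i []).getD (j+1) 0,
                       (matrix.getD (i+1) []).getD j 0, (matrix.getD (i+1) []).getD (j+1) 0))) := by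
      funext acc i
      exact PySem.List.foldl_append_singleton_eq_map _ _ _
    show (List.range (matrix.length - 1)).foldl _ [] = _
    rw [h, PySem.List.foldl_append_eq_flatMap]
    rfl
  rw [hsq]
  rw [run_eq_card sqKey sqKey_inj _ (PySem.List.sorted_pairwise (sqList matrix) sqKey)]
  congr 1
  exact congrArg Finset.card (List.toFinset_eq_of_perm _ _
    (PySem.List.sorted_perm (sqList matrix) sqKey false))

-- ===== VERDICT (by name: the statement is the Claim_ definition above) =====
theorem differentSquares_spec : Claim_equal_differentSquares := by
  intro matrix _ _
  unfold Spec_differentSquares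
  rw [A_eq, B_eq, ofList_len]
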